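-- pv_equiv track=rewrite | github.com/OlaszPL/Algorithms_and_data_structures_course | Part 1 - sortowania/Kolokwia/2020/zad3.py | check
-- ===== SOURCE A (Python) =====
-- def partition(T, p, r):
--     x = T[(p + r) // 2]
--     i = p - 1
--     j = r + 1
--
--     while True:
--         while True:
--             j -= 1
--             if T[j] <= x: break
--         while True:
--             i += 1
--             if T[i] >= x: break
--
--         if i < j:
--             T[i], T[j] = T[j], T[i]
--         else:
--             return j
--
-- def quicksort(T, p, r):
--     if p < r:
--         x = partition(T, p, r)
--         quicksort(T, p, x)
--         quicksort(T, x + 1, r)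
--
-- def check(T):
--     n = len(T)
--
--     quicksort(T, 0, n - 1)
--
--     for k in range(n):
--         i, j = 0, n - 1
--         flag = 0
--         while i < j:
--             if T[i] + T[j] == T[k]:
--                 flag = 1
--                 break
--             elif T[i] + T[j] < T[k]:
--                 i += 1
--             else:
--                 j -= 1
--
--         if not flag:
--             return False
--
--     return True
-- ===== SOURCE B (Python) =====
-- def check(T):
--     T.sort()
--     n = len(T)
--     sums = set()
--     for i in range(n):
--         for j in range(i + 1, n):
--             sums.add(T[i] + T[j])
--     return all(T[k] in sums for k in range(n))
-- ===== Notes on version B (the rewrite author's own statement) =====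
-- stated objective: alternative
-- what changed: Replaces the per-element two-pointer scans over the sorted array by one precomputed set of all distinct-index pairwise sums followed by plain membership tests (the in-place sort is kept).
import Mathlib
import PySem

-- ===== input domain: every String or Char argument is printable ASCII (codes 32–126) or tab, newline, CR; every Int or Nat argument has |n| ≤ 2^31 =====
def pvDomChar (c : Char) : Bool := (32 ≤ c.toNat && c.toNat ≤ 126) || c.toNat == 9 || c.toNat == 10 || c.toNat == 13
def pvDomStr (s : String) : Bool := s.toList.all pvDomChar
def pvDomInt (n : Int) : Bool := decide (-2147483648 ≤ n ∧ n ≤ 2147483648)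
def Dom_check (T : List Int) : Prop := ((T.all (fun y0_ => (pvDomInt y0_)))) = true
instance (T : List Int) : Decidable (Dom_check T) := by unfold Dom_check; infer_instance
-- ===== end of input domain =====

-- B replaces A's per-element two-pointer scans by one precomputed set of all distinct-index
-- pairwise sums plus membership tests (objective: alternative algorithm, similar cost).
-- Both A and B sort the argument list in place in Python; the equivalence proved here is
-- about the RETURN value (the in-place sorted state is identical in A and B anyway).

-- ===== PORT A =====
-- inner 'while True: j -= 1; if T[j] <= x: break' (fuel-guarded; fuel never runs out on the
-- executions reached from check, as the proofs below establish)
def innerJ (T : List Int) (x : Int) (j : Int) : Nat → Option Int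
  | 0 => none
  | f + 1 =>
    let j' := j - 1
    match PySem.List.pyGet? T j' with
    | none => none
    | some v => if v ≤ x then some j' else innerJ T x j' f

-- inner 'while True: i += 1; if T[i] >= x: break'
def innerI (T : List Int) (x : Int) (i : Int) : Nat → Option Int
  | 0 => none
  | f + 1 =>
    let i' := i + 1
    match PySem.List.pyGet? T i' with
    | none => none
    | some v => if x ≤ v then some i' else innerI T x i' f

-- outer 'while True' of partition: scan j down, scan i up, swap or return j
def partLoop (T : List Int) (x : Int) (i j : Int) : Nat → Option (List Int × Int)
  | 0 => none
  | f + 1 =>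
    match innerJ T x j (T.length + 1) with
    | none => none
    | some j' =>
      match innerI T x i (T.length + 1) with
      | none => none
      | some i' =>
        if i' < j' then
          match PySem.List.pyGet? T i', PySem.List.pyGet? T j' with
          | some a, some b =>
            -- T[i], T[j] = T[j], T[i]
            partLoop (PySem.List.pySetD (PySem.List.pySetD T i' b) j' a) x i' j' f
          | _, _ => none
        else some (T, j')

def partitionF (T : List Int) (p r : Int) : Option (List Int × Int) :=
  match PySem.List.pyGet? T (PySem.Int.floordiv (p + r) 2) with
  | none => none
  | some x => partLoop T x (p - 1) (r + 1) (T.length + 2)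

def quicksortF : Nat → List Int → Int → Int → Option (List Int)
  | 0, T, p, r => if p < r then none else some T
  | f + 1, T, p, r =>
    if p < r then
      match partitionF T p r with
      | none => none
      | some (T', x) =>
        match quicksortF f T' p x with
        | none => none
        | some T'' => quicksortF f T'' (x + 1) r
    else some T

-- the per-element two-pointer scan: 'i, j = 0, n - 1; while i < j: …'
def tpLoop (S : List Int) (t : Int) (i j : Int) : Bool :=
  if i < j then
    let a := PySem.List.pyGetD S i 0
    let b := PySem.List.pyGetD S j 0
    if a + b = t then true
    else if a + b < t then tpLoop S t (i + 1) j
    else tpLoop S t i (j - 1)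
  else false
termination_by (j - i).toNat
decreasing_by
  · omega
  · omega

def check (T : List Int) : Bool :=
  let n : Int := T.length
  match quicksortF T.length T 0 (n - 1) with
  | none => false
  | some S =>
    (PySem.List.pyRange 0 n 1).all
      (fun k => tpLoop S (PySem.List.pyGetD S k 0) 0 (n - 1))

-- ===== PORT B =====
def check_alt (T : List Int) : Bool :=
  let S := PySem.List.sorted T (fun y => y) false      -- T.sort()
  let n : Int := S.length
  let sums : PySem.Set Int :=
    (PySem.List.pyRange 0 n 1).foldl
      (fun acc i =>
        (PySem.List.pyRange (i + 1) n 1).foldl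
          (fun acc2 j => acc2.add (PySem.List.pyGetD S i 0 + PySem.List.pyGetD S j 0))
          acc)
      PySem.Set.empty
  (PySem.List.pyRange 0 n 1).all (fun k => PySem.Set.contains sums (PySem.List.pyGetD S k 0))

-- ===== PRECONDITION & SPEC =====
def Spec_check (T : List Int) (out : Bool) : Prop := out = check_alt T
instance (T : List Int) (out : Bool) : Decidable (Spec_check T out) := by unfold Spec_check; infer_instance

-- ===== CLAIM (what is proved, stated in full; the proofs are below) =====
def Claim_equal_check : Prop := ∀ (T : List Int), Dom_check T → Spec_check T (check T)

-- ===== LEMMAS AND PROOFS =====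

-- value at an Int index (used only at provably in-range, nonnegative indices)
def getI (T : List Int) (k : Int) : Int := T.getD k.toNat 0

theorem pyGet?_getI (T : List Int) (k : Int) (h0 : 0 ≤ k) (h : k < T.length) :
    PySem.List.pyGet? T k = some (getI T k) := by
  rw [PySem.List.pyGet?_eq_some_getElem T h0 h, getI,
    List.getD_eq_getElem T 0 (by omega)]

theorem getI_set (T : List Int) (u v k : Int) (hu0 : 0 ≤ u) (hu : u < T.length)
    (hk0 : 0 ≤ k) (hk : k < T.length) :
    getI (T.set u.toNat v) k = if k = u then v else getI T k := by
  unfold getI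
  rw [List.getD_eq_getElem _ 0 (by simp; omega), List.getElem_set]
  by_cases h : k = u
  · rw [if_pos (by omega), if_pos h]
  · rw [if_neg (by omega), if_neg h, List.getD_eq_getElem _ 0 (by omega)]

-- innerJ finds the greatest index m < j with T[m] ≤ x (when one exists and fuel suffices)
theorem innerJ_spec (T : List Int) (x j m : Int) (f : Nat)
    (hm0 : 0 ≤ m) (hmj : m < j) (hjn : j ≤ T.length)
    (hPm : getI T m ≤ x) (hmax : ∀ k, m < k → k < j → x < getI T k)
    (hf : (j - m).toNat ≤ f) :
    innerJ T x j f = some m := by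
  induction f generalizing j with
  | zero => omega
  | succ f ih =>
    rw [innerJ]
    rw [pyGet?_getI T (j - 1) (by omega) (by omega)]
    by_cases hjm : j - 1 = m
    · simp only [hjm, if_pos hPm]
    · have hlt : x < getI T (j - 1) := hmax _ (by omega) (by omega)
      show (if getI T (j - 1) ≤ x then some (j - 1) else innerJ T x (j - 1) f) = some m
      rw [if_neg (by omega)]
      exact ih (j - 1) (by omega) (by omega) (fun k h1 h2 => hmax k h1 (by omega)) (by omega)

-- innerI finds the least index m > i with x ≤ T[m]
theorem innerI_spec (T : List Int) (x i m : Int) (f : Nat)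
    (hi : -1 ≤ i) (him : i < m) (hmn : m < T.length)
    (hPm : x ≤ getI T m) (hmin : ∀ k, i < k → k < m → getI T k < x)
    (hf : (m - i).toNat ≤ f) :
    innerI T x i f = some m := by
  induction f generalizing i with
  | zero => omega
  | succ f ih =>
    rw [innerI]
    rw [pyGet?_getI T (i + 1) (by omega) (by omega)]
    by_cases him' : i + 1 = m
    · simp only [him', if_pos hPm]
    · have hlt : getI T (i + 1) < x := hmin _ (by omega) (by omega)
      show (if x ≤ getI T (i + 1) then some (i + 1) else innerI T x (i + 1) f) = some m
      rw [if_neg (by omega)]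
      exact ih (i + 1) (by omega) (by omega) (fun k h1 h2 => hmin k (by omega) h2) (by omega)

-- loop invariant of partLoop (p r x fixed; T i j the loop state)
def PInv (T : List Int) (p r x i j : Int) : Prop :=
  0 ≤ p ∧ p < r ∧ r < T.length ∧
  p - 1 ≤ i ∧ i < j ∧ j ≤ r + 1 ∧
  (∀ k, p ≤ k → k ≤ i → getI T k ≤ x) ∧
  (∀ k, j ≤ k → k ≤ r → x ≤ getI T k) ∧
  (∃ k, p ≤ k ∧ k < j ∧ k ≤ r ∧ getI T k ≤ x) ∧
  (∃ k, i < k ∧ k ≤ r ∧ x ≤ getI T k) ∧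
  (j ≤ r ∨ (∃ m, i < m ∧ p ≤ m ∧ m < r ∧ x ≤ getI T m))

-- partLoop terminates with a correct Hoare split
theorem partLoop_spec (p r x : Int) (f : Nat) (T : List Int) (i j : Int)
    (hinv : PInv T p r x i j) (hf : (j - p + 1).toNat ≤ f) :
    ∃ T' j₁, partLoop T x i j f = some (T', j₁) ∧
      T'.length = T.length ∧ T'.Perm T ∧
      (∀ k, 0 ≤ k → (k < p ∨ r < k) → getI T' k = getI T k) ∧
      p ≤ j₁ ∧ j₁ < r ∧
      (∀ k, p ≤ k → k ≤ j₁ → getI T' k ≤ x) ∧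
      (∀ k, j₁ < k → k ≤ r → x ≤ getI T' k) ∧
      (∀ b, (∀ k, p ≤ k → k ≤ r → getI T k ≤ b) → ∀ k, p ≤ k → k ≤ r → getI T' k ≤ b) ∧
      (∀ b, (∀ k, p ≤ k → k ≤ r → b ≤ getI T k) → ∀ k, p ≤ k → k ≤ r → b ≤ getI T' k) := by
  induction f generalizing T i j with
  | zero => exfalso; obtain ⟨_, _, _, h4, h5, _⟩ := hinv; omega
  | succ f ih =>
    obtain ⟨hp0, hpr, hrn, hi, hij, hjr, hL, hR, ⟨wj, hwj⟩, ⟨wi, hwi⟩, hD⟩ := hinv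
    -- the j-scan lands on the greatest index j₁ < j with T[j₁] ≤ x
    obtain ⟨j₁, ⟨hj₁p, hj₁j, hj₁x⟩, hj₁max⟩ :=
      Int.exists_greatest_of_bdd (P := fun k => p ≤ k ∧ k < j ∧ getI T k ≤ x)
        ⟨j, fun z hz => le_of_lt hz.2.1⟩ ⟨wj, hwj.1, hwj.2.1, hwj.2.2.2⟩
    have hJhigh : ∀ k, j₁ < k → k < j → x < getI T k := by
      intro k h1 h2
      by_cases hle : getI T k ≤ x
      · exact absurd (hj₁max k ⟨by omega, h2, hle⟩) (by omega)
      · omega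
    have hJrun : innerJ T x j (T.length + 1) = some j₁ :=
      innerJ_spec T x j j₁ _ (by omega) hj₁j (by omega) hj₁x hJhigh (by omega)
    -- the i-scan lands on the least index i₁ > i with T[i₁] ≥ x
    obtain ⟨i₁, ⟨hi₁i, hi₁r, hi₁x⟩, hi₁min⟩ :=
      Int.exists_least_of_bdd (P := fun k => i < k ∧ k ≤ r ∧ x ≤ getI T k)
        ⟨i, fun z hz => le_of_lt hz.1⟩ ⟨wi, hwi⟩
    have hIlow : ∀ k, i < k → k < i₁ → getI T k < x := by
      intro k h1 h2
      by_cases hle : x ≤ getI T k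
      · exact absurd (hi₁min k ⟨h1, by omega, hle⟩) (by omega)
      · omega
    have hIrun : innerI T x i (T.length + 1) = some i₁ :=
      innerI_spec T x i i₁ _ (by omega) hi₁i (by omega) hi₁x hIlow (by omega)
    simp only [partLoop, hJrun, hIrun]
    by_cases hc : i₁ < j₁
    · -- swap T[i₁] and T[j₁], continue with pointers (i₁, j₁)
      have h0i : (0 : Int) ≤ i₁ := by omega
      have h0j : (0 : Int) ≤ j₁ := by omega
      simp only [if_pos hc, pyGet?_getI T i₁ h0i (by omega),
        pyGet?_getI T j₁ h0j (by omega),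
        PySem.List.pySetD_of_nonneg _ _ h0i, PySem.List.pySetD_of_nonneg _ _ h0j]
      set T₂ := (T.set i₁.toNat (getI T j₁)).set j₁.toNat (getI T i₁) with hT₂
      have hlen₂ : T₂.length = T.length := by simp [hT₂]
      have hget₂ : ∀ k, 0 ≤ k → k < (T.length : Int) →
          getI T₂ k = if k = j₁ then getI T i₁ else if k = i₁ then getI T j₁ else getI T k := by
        intro k h1 h2
        rw [hT₂, getI_set _ _ _ _ (by omega) (by simp; omega) h1 (by simp; omega),
          getI_set _ _ _ _ (by omega) (by omega) h1 h2]
      have hperm₂ : T₂.Perm T := by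
        have e1 : getI T j₁ = T[j₁.toNat]'(by omega) := by
          rw [getI, List.getD_eq_getElem _ 0 (by omega)]
        have e2 : getI T i₁ = T[i₁.toNat]'(by omega) := by
          rw [getI, List.getD_eq_getElem _ 0 (by omega)]
        rw [hT₂, e1, e2]
        exact List.set_set_perm (by omega) (by omega)
      have hinv₂ : PInv T₂ p r x i₁ j₁ := by
        refine ⟨hp0, hpr, by omega, by omega, hc, by omega, ?_, ?_, ?_, ?_, ?_⟩
        · intro k h1 h2
          rw [hget₂ k (by omega) (by omega)]
          by_cases hk1 : k = j₁
          · omega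
          · rw [if_neg hk1]
            by_cases hk2 : k = i₁
            · rw [if_pos hk2]; exact hj₁x
            · rw [if_neg hk2]
              by_cases hk3 : k ≤ i
              · exact hL k h1 hk3
              · exact le_of_lt (hIlow k (by omega) (by omega))
        · intro k h1 h2
          rw [hget₂ k (by omega) (by omega)]
          by_cases hk1 : k = j₁
          · rw [if_pos hk1]; exact hi₁x
          · rw [if_neg hk1, if_neg (by omega)]
            by_cases hk3 : j ≤ k
            · exact hR k hk3 h2
            · exact le_of_lt (hJhigh k (by omega) (by omega))
        · refine ⟨i₁, by omega, hc, by omega, ?_⟩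
          rw [hget₂ i₁ (by omega) (by omega), if_neg (by omega), if_pos rfl]
          exact hj₁x
        · refine ⟨j₁, hc, by omega, ?_⟩
          rw [hget₂ j₁ (by omega) (by omega), if_pos rfl]
          exact hi₁x
        · exact Or.inl (by omega)
      obtain ⟨T', j', hrun, hlen, hperm, hout, hj'p, hj'r, hfL, hfR, hpres, hpres'⟩ :=
        ih T₂ i₁ j₁ hinv₂ (by omega)
      refine ⟨T', j', hrun, by omega, hperm.trans hperm₂, ?_, hj'p, hj'r, hfL, hfR, ?_, ?_⟩
      · intro k h1 h2
        rw [hout k h1 h2]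
        by_cases hk : k < (T.length : Int)
        · rw [hget₂ k h1 hk, if_neg (by omega), if_neg (by omega)]
        · rw [getI, getI, List.getD_eq_default _ _ (by simp [hlen₂]; omega),
            List.getD_eq_default _ _ (by omega)]
      · intro b hb k h1 h2
        refine hpres b ?_ k h1 h2
        intro k' h1' h2'
        rw [hget₂ k' (by omega) (by omega)]
        by_cases hk1 : k' = j₁
        · rw [if_pos hk1]; exact hb i₁ (by omega) (by omega)
        · rw [if_neg hk1]
          by_cases hk2 : k' = i₁
          · rw [if_pos hk2]; exact hb j₁ (by omega) (by omega)
          · rw [if_neg hk2]; exact hb k' h1' h2'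
      · intro b hb k h1 h2
        refine hpres' b ?_ k h1 h2
        intro k' h1' h2'
        rw [hget₂ k' (by omega) (by omega)]
        by_cases hk1 : k' = j₁
        · rw [if_pos hk1]; exact hb i₁ (by omega) (by omega)
        · rw [if_neg hk1]
          by_cases hk2 : k' = i₁
          · rw [if_pos hk2]; exact hb j₁ (by omega) (by omega)
          · rw [if_neg hk2]; exact hb k' h1' h2'
    · -- i₁ ≥ j₁: return (T, j₁)
      simp only [if_neg hc]
      have hj₁r : j₁ < r := by
        rcases hD with hjr' | ⟨m, hm1, hm2, hm3, hm4⟩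
        · omega
        · have : i₁ ≤ m := hi₁min m ⟨hm1, by omega, hm4⟩
          omega
      refine ⟨T, j₁, rfl, rfl, List.Perm.refl _, fun _ _ _ => rfl, hj₁p, hj₁r,
        ?_, ?_, fun b h => h, fun b h => h⟩
      · intro k h1 h2
        by_cases hk3 : k ≤ i
        · exact hL k h1 hk3
        · by_cases hk4 : k < i₁
          · exact le_of_lt (hIlow k (by omega) hk4)
          · have : k = j₁ := by omega
            exact this ▸ hj₁x
      · intro k h1 h2
        by_cases hk : k < j
        · exact le_of_lt (hJhigh k h1 hk)
        · exact hR k (by omega) h2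

-- partition returns a proper split of [p, r]
theorem partitionF_spec (T : List Int) (p r : Int)
    (hp : 0 ≤ p) (hpr : p < r) (hr : r < T.length) :
    ∃ T' j₁, partitionF T p r = some (T', j₁) ∧
      T'.length = T.length ∧ T'.Perm T ∧
      (∀ k, 0 ≤ k → (k < p ∨ r < k) → getI T' k = getI T k) ∧
      p ≤ j₁ ∧ j₁ < r ∧
      (∃ x, (∀ k, p ≤ k → k ≤ j₁ → getI T' k ≤ x) ∧
            (∀ k, j₁ < k → k ≤ r → x ≤ getI T' k)) ∧
      (∀ b, (∀ k, p ≤ k → k ≤ r → getI T k ≤ b) → ∀ k, p ≤ k → k ≤ r → getI T' k ≤ b) ∧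
      (∀ b, (∀ k, p ≤ k → k ≤ r → b ≤ getI T k) → ∀ k, p ≤ k → k ≤ r → b ≤ getI T' k) := by
  have hm := PySem.Int.floordiv_two_mid_bounds (le_of_lt hpr)
  have hmr : PySem.Int.floordiv (p + r) 2 < r :=
    (PySem.Int.floordiv_lt_iff_lt_mul (by omega)).mpr (by omega)
  rw [partitionF, pyGet?_getI T _ (by omega) (by omega)]
  obtain ⟨T', j₁, hrun, hlen, hperm, hout, hj₁p, hj₁r, hfL, hfR, hpres, hpres'⟩ :=
    partLoop_spec p r (getI T (PySem.Int.floordiv (p + r) 2)) (T.length + 2) T (p - 1) (r + 1)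
      ⟨hp, hpr, hr, by omega, by omega, by omega,
        fun k h1 h2 => by omega, fun k h1 h2 => by omega,
        ⟨PySem.Int.floordiv (p + r) 2, by omega, by omega, by omega, le_refl _⟩,
        ⟨PySem.Int.floordiv (p + r) 2, by omega, by omega, le_refl _⟩,
        Or.inr ⟨PySem.Int.floordiv (p + r) 2, by omega, by omega, hmr, le_refl _⟩⟩
      (by omega)
  exact ⟨T', j₁, hrun, hlen, hperm, hout, hj₁p, hj₁r, ⟨_, hfL, hfR⟩, hpres, hpres'⟩

-- quicksort sorts the segment [p, r]
theorem quicksortF_spec (f : Nat) (T : List Int) (p r : Int)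
    (hp : 0 ≤ p) (hr : r < T.length) (hf : (r + 1 - p).toNat ≤ f) :
    ∃ T', quicksortF f T p r = some T' ∧
      T'.length = T.length ∧ T'.Perm T ∧
      (∀ k, 0 ≤ k → (k < p ∨ r < k) → getI T' k = getI T k) ∧
      (∀ k l, p ≤ k → k ≤ l → l ≤ r → getI T' k ≤ getI T' l) ∧
      (∀ b, (∀ k, p ≤ k → k ≤ r → getI T k ≤ b) → ∀ k, p ≤ k → k ≤ r → getI T' k ≤ b) ∧
      (∀ b, (∀ k, p ≤ k → k ≤ r → b ≤ getI T k) → ∀ k, p ≤ k → k ≤ r → b ≤ getI T' k) := by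
  induction f generalizing T p r with
  | zero =>
    rw [quicksortF, if_neg (by omega)]
    refine ⟨T, rfl, rfl, List.Perm.refl _, fun _ _ _ => rfl, ?_, fun b h => h, fun b h => h⟩
    intro k l h1 h2 h3
    have : k = l := by omega
    subst this; exact le_refl _
  | succ f ih =>
    by_cases hpr : p < r
    · rw [quicksortF, if_pos hpr]
      obtain ⟨T1, j, hrun1, hlen1, hperm1, hout1, hjp, hjr, ⟨x, hfL, hfR⟩, hpres1, hpres1'⟩ :=
        partitionF_spec T p r hp hpr hr
      obtain ⟨T2, hrun2, hlen2, hperm2, hout2, hsort2, hpres2, hpres2'⟩ :=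
        ih T1 p j hp (by omega) (by omega)
      obtain ⟨T3, hrun3, hlen3, hperm3, hout3, hsort3, hpres3, hpres3'⟩ :=
        ih T2 (j + 1) r (by omega) (by omega) (by omega)
      simp only [hrun1, hrun2, hrun3]
      -- values at [p, j] of T3 are those of T2; values at [j+1, r] of T2 are those of T1
      have e32 : ∀ k, p ≤ k → k ≤ j → getI T3 k = getI T2 k := by
        intro k h1 h2; exact hout3 k (by omega) (by omega)
      have e21 : ∀ k, j < k → k ≤ r → getI T2 k = getI T1 k := by
        intro k h1 h2; exact hout2 k (by omega) (by omega)
      have hub : ∀ k, p ≤ k → k ≤ j → getI T3 k ≤ x := by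
        intro k h1 h2
        rw [e32 k h1 h2]
        exact hpres2 x hfL k h1 h2
      have hlb : ∀ k, j < k → k ≤ r → x ≤ getI T3 k := by
        intro k h1 h2
        refine hpres3' x ?_ k (by omega) h2
        intro k' h1' h2'
        rw [e21 k' (by omega) h2']
        exact hfR k' (by omega) h2'
      refine ⟨T3, rfl, by omega, hperm3.trans (hperm2.trans hperm1), ?_, ?_, ?_, ?_⟩
      · intro k h1 h2
        rw [hout3 k h1 (by omega), hout2 k h1 (by omega), hout1 k h1 h2]
      · intro k l h1 h2 h3
        by_cases hlj : l ≤ j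
        · rw [e32 k h1 (by omega), e32 l (by omega) hlj]
          exact hsort2 k l h1 h2 hlj
        · by_cases hkj : j + 1 ≤ k
          · exact hsort3 k l hkj h2 h3
          · exact le_trans (hub k h1 (by omega)) (hlb l (by omega) h3)
      · intro b hb k h1 h2
        have hb1 : ∀ k, p ≤ k → k ≤ r → getI T1 k ≤ b := hpres1 b hb
        have hb2 : ∀ k, p ≤ k → k ≤ r → getI T2 k ≤ b := by
          intro k' h1' h2'
          by_cases hk' : k' ≤ j
          · exact hpres2 b (fun u hu1 hu2 => hb1 u hu1 (by omega)) k' h1' hk'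
          · rw [e21 k' (by omega) h2']; exact hb1 k' h1' h2'
        by_cases hk : k ≤ j
        · rw [e32 k h1 hk]; exact hb2 k h1 (by omega)
        · exact hpres3 b (fun u hu1 hu2 => hb2 u (by omega) hu2) k (by omega) h2
      · intro b hb k h1 h2
        have hb1 : ∀ k, p ≤ k → k ≤ r → b ≤ getI T1 k := hpres1' b hb
        have hb2 : ∀ k, p ≤ k → k ≤ r → b ≤ getI T2 k := by
          intro k' h1' h2'
          by_cases hk' : k' ≤ j
          · exact hpres2' b (fun u hu1 hu2 => hb1 u hu1 (by omega)) k' h1' hk'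
          · rw [e21 k' (by omega) h2']; exact hb1 k' h1' h2'
        by_cases hk : k ≤ j
        · rw [e32 k h1 hk]; exact hb2 k h1 (by omega)
        · exact hpres3' b (fun u hu1 hu2 => hb2 u (by omega) hu2) k (by omega) h2
    · rw [quicksortF, if_neg hpr]
      refine ⟨T, rfl, rfl, List.Perm.refl _, fun _ _ _ => rfl, ?_, fun b h => h, fun b h => h⟩
      intro k l h1 h2 h3
      have : k = l := by omega
      subst this; exact le_refl _

-- the two-pointer scan decides "t is a sum of two distinct-index elements of S[i..j]"
theorem tpLoop_iff (S : List Int) (t : Int)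
    (hs : ∀ k l : Int, 0 ≤ k → k ≤ l → l < S.length → getI S k ≤ getI S l)
    (d : Nat) (i j : Int) (hi : 0 ≤ i) (hj : j < S.length) (hd : (j - i).toNat ≤ d) :
    (tpLoop S t i j = true ↔
      ∃ a b : Int, i ≤ a ∧ a < b ∧ b ≤ j ∧ getI S a + getI S b = t) := by
  induction d generalizing i j with
  | zero =>
    rw [tpLoop, if_neg (by omega)]
    simp only [Bool.false_eq_true, false_iff]
    rintro ⟨a, b, h1, h2, h3, _⟩
    omega
  | succ d ihd =>
    by_cases hij : i < j
    · have ha : PySem.List.pyGetD S i 0 = getI S i := by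
        rw [PySem.List.pyGetD_eq_getElem S 0 hi (by omega), getI,
          List.getD_eq_getElem _ 0 (by omega)]
      have hb : PySem.List.pyGetD S j 0 = getI S j := by
        rw [PySem.List.pyGetD_eq_getElem S 0 (by omega) (by omega), getI,
          List.getD_eq_getElem _ 0 (by omega)]
      rw [tpLoop]
      simp only [if_pos hij, ha, hb]
      by_cases heq : getI S i + getI S j = t
      · simp only [if_pos heq, true_iff]
        exact ⟨i, j, le_refl _, hij, le_refl _, heq⟩
      · rw [if_neg heq]
        by_cases hlt : getI S i + getI S j < t
        · rw [if_pos hlt, ihd (i + 1) j (by omega) hj (by omega)]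
          constructor
          · rintro ⟨a, b, h1, h2, h3, h4⟩
            exact ⟨a, b, by omega, h2, h3, h4⟩
          · rintro ⟨a, b, h1, h2, h3, h4⟩
            refine ⟨a, b, ?_, h2, h3, h4⟩
            by_contra hcon
            have hai : a = i := by omega
            subst hai
            have : getI S b ≤ getI S j := hs b j (by omega) h3 hj
            omega
        · rw [if_neg hlt, ihd i (j - 1) hi (by omega) (by omega)]
          constructor
          · rintro ⟨a, b, h1, h2, h3, h4⟩
            exact ⟨a, b, h1, h2, by omega, h4⟩
          · rintro ⟨a, b, h1, h2, h3, h4⟩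
            refine ⟨a, b, h1, h2, ?_, h4⟩
            by_contra hcon
            have hbj : b = j := by omega
            subst hbj
            have : getI S i ≤ getI S a := hs i a hi h1 (by omega)
            omega
    · rw [tpLoop, if_neg hij]
      simp only [Bool.false_eq_true, false_iff]
      rintro ⟨a, b, h1, h2, h3, _⟩
      omega

-- membership in a fold of Set.add's
theorem mem_foldl_add {α : Type} (l : List α) (g : α → Int) (s : PySem.Set Int) (v : Int) :
    (v ∈ l.foldl (fun acc e => acc.add (g e)) s) ↔ v ∈ s ∨ ∃ e ∈ l, g e = v := by
  induction l generalizing s with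
  | nil => simp
  | cons e l ih =>
    simp only [List.foldl_cons, ih, PySem.Set.mem_add]
    constructor
    · rintro ((h | h) | ⟨e', he', h⟩)
      · exact Or.inl h
      · exact Or.inr ⟨e, by simp, h.symm⟩
      · exact Or.inr ⟨e', by simp [he'], h⟩
    · rintro (h | ⟨e', he', h⟩)
      · exact Or.inl (Or.inl h)
      · rcases List.mem_cons.mp he' with h' | h'
        · exact Or.inl (Or.inr (h' ▸ h.symm))
        · exact Or.inr ⟨e', h', h⟩

-- membership in the nested double fold building the sum set
theorem mem_foldl_foldl_add {α β : Type} (l : List α) (h : α → List β) (g : α → β → Int)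
    (s : PySem.Set Int) (v : Int) :
    (v ∈ l.foldl (fun acc e => (h e).foldl (fun acc2 e2 => acc2.add (g e e2)) acc) s) ↔
      v ∈ s ∨ ∃ e ∈ l, ∃ e2 ∈ h e, g e e2 = v := by
  induction l generalizing s with
  | nil => simp
  | cons e l ih =>
    simp only [List.foldl_cons, ih, mem_foldl_add]
    constructor
    · rintro ((hv | ⟨e2, he2, hg⟩) | ⟨e', he', e2, he2, hg⟩)
      · exact Or.inl hv
      · exact Or.inr ⟨e, by simp, e2, he2, hg⟩
      · exact Or.inr ⟨e', by simp [he'], e2, he2, hg⟩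
    · rintro (hv | ⟨e', he', e2, he2, hg⟩)
      · exact Or.inl (Or.inl hv)
      · rcases List.mem_cons.mp he' with h' | h'
        · exact Or.inl (Or.inr ⟨e2, h' ▸ he2, h' ▸ hg⟩)
        · exact Or.inr ⟨e', h', e2, he2, hg⟩

theorem all_congr_mem {α : Type} (l : List α) (f g : α → Bool)
    (h : ∀ x ∈ l, f x = g x) : l.all f = l.all g := by
  induction l with
  | nil => rfl
  | cons a l ih =>
    simp only [List.all_cons, h a (by simp), ih (fun x hx => h x (by simp [hx]))]

-- ===== VERDICT (by name: the statement is the Claim_ definition above) =====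
theorem check_spec : Claim_equal_check := by
  intro T _
  unfold Spec_check
  obtain ⟨S, hrun, hlenS, hpermS, -, hsortS, -, -⟩ :=
    quicksortF_spec T.length T 0 ((T.length : Int) - 1) (le_refl 0) (by omega) (by omega)
  have hn : (S.length : Int) = (T.length : Int) := by exact_mod_cast congrArg Nat.cast hlenS
  have hSs : ∀ k l : Int, 0 ≤ k → k ≤ l → l < (S.length : Int) → getI S k ≤ getI S l :=
    fun k l h1 h2 h3 => hsortS k l h1 h2 (by omega)
  have hgetNat : ∀ (a : Nat), a < S.length → getI S (a : Int) = S.getD a 0 := by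
    intro a _; rw [getI, Int.toNat_natCast]
  have hpw : List.Pairwise (· ≤ ·) S := by
    rw [List.pairwise_iff_getElem]
    intro a b ha hb hab
    rw [← List.getD_eq_getElem S 0 ha, ← List.getD_eq_getElem S 0 hb,
      ← hgetNat a ha, ← hgetNat b hb]
    exact hSs a b (by omega) (by exact_mod_cast le_of_lt hab) (by exact_mod_cast hb)
  have hSeq : PySem.List.sorted T (fun y => y) false = S :=
    PySem.List.sorted_id_eq_of_perm_of_pairwise T S hpermS hpw
  have hPD : ∀ u : Int, 0 ≤ u → u < (S.length : Int) → PySem.List.pyGetD S u 0 = getI S u := by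
    intro u h1 h2
    rw [PySem.List.pyGetD_eq_getElem S 0 h1 h2, getI, List.getD_eq_getElem _ 0 (by omega)]
  simp only [check, check_alt, hrun, hSeq, hn]
  apply all_congr_mem
  intro k hk
  have hk' : 0 ≤ k ∧ k < (T.length : Int) := (PySem.List.mem_pyRange_one).mp hk
  apply Bool.coe_iff_coe.mp
  rw [tpLoop_iff S _ hSs T.length 0 ((T.length : Int) - 1) (le_refl 0) (by omega) (by omega),
    PySem.Set.contains_iff, mem_foldl_foldl_add]
  constructor
  · rintro ⟨a, b, h1, h2, h3, h4⟩
    refine Or.inr ⟨a, PySem.List.mem_pyRange_one.mpr (by omega), b,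
      PySem.List.mem_pyRange_one.mpr (by omega), ?_⟩
    rw [hPD a (by omega) (by omega), hPD b (by omega) (by omega)]
    exact h4
  · rintro (hv | ⟨a, ha, b, hb, hg⟩)
    · exact absurd hv (by simp [PySem.Set.empty])
    · have ha' := PySem.List.mem_pyRange_one.mp ha
      have hb' := PySem.List.mem_pyRange_one.mp hb
      rw [hPD a (by omega) (by omega), hPD b (by omega) (by omega)] at hg
      exact ⟨a, b, by omega, by omega, by omega, hg⟩
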